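-- pv_equiv track=rewrite | github.com/tomer202/R-M | location.py | break_the_rules_fetch
-- ===== SOURCE A (Python) =====
-- SEGNIFICATE_FLAGS_FETCH = ["id"]
--
-- def break_the_rules_fetch(flags):
--     """
--     this function check if rules are broken, if SEGNIFICATE_FLAGS_FETCH and more flags are inputed then rulse are broken....
--     :param flags: the flags that are used
--     :return: if broke rules or not
--     """
--     rules = list(filter(lambda rule: flags[rule], flags.keys()))
--     broke = False
--     for flag in rules:
--         if flag in SEGNIFICATE_FLAGS_FETCH and len(rules) > 1:
--             broke = True
--             break
--     return broke
-- ===== SOURCE B (Python) =====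
-- SEGNIFICATE_FLAGS_FETCH = ["id"]
--
-- def break_the_rules_fetch(flags):
--     # One fused pass over the items with an accumulator (truthy count,
--     # significant-flag-seen), breaking early once both conditions hold.
--     count, sig = 0, False
--     for k, v in flags.items():
--         if sig and count > 1:
--             break
--         if v:
--             count += 1
--             sig = sig or k in SEGNIFICATE_FLAGS_FETCH
--     return sig and count > 1
-- ===== Notes on version B (the rewrite author's own statement) =====
-- stated objective: alternative
-- what changed: B replaces A's two-stage filter-the-truthy-keys-then-scan-with-break by one fused pass over the items carrying an accumulator (truthy count, significant-flag-seen) with an early break once both conditions hold.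
import Mathlib
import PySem

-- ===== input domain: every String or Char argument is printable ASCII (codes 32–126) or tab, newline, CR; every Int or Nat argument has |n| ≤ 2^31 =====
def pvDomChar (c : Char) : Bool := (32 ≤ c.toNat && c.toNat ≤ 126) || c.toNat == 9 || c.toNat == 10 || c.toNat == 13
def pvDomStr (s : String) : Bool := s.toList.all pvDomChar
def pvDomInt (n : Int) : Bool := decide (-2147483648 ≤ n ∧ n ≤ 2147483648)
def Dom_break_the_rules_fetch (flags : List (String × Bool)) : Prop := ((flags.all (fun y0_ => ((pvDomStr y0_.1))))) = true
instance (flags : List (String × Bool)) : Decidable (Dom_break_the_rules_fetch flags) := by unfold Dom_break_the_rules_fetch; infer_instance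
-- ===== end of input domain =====

-- B replaces A's filter-then-scan-with-break by one fused pass over the items
-- carrying an accumulator (truthy count, significant-flag-seen) with an early
-- break once both hold (objective: alternative).

-- ===== PORT A =====
-- the 'for flag in rules: if … : broke = True; break' loop, with n = len(rules)
def pvLoopA : List String → Int → Bool
  | [], _ => false
  | flag :: rest, n =>
      if (["id"].contains flag) && decide (1 < n) then true else pvLoopA rest n

def break_the_rules_fetch (flags : List (String × Bool)) : Bool :=
  let d := PySem.Dict.ofList flags
  let rules := d.keys.filter (fun rule => d.getD rule false)
  pvLoopA rules (rules.length : Int)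

-- ===== PORT B =====
-- Source B's fused loop over the items as structural recursion over the same state;
-- an early break returns 'sig and count > 1' = true, the exhausted loop returns it too
def pvGoB : List (String × Bool) → Int → Bool → Bool
  | items, count, sig =>
      if sig && decide (1 < count) then true
      else
        match items with
        | [] => false
        | (k, v) :: rest =>
            if v then pvGoB rest (count + 1) (sig || ["id"].contains k)
            else pvGoB rest count sig

def break_the_rules_fetch_alt (flags : List (String × Bool)) : Bool :=
  pvGoB (PySem.Dict.ofList flags).items 0 false

-- ===== PRECONDITION & SPEC =====
def Spec_break_the_rules_fetch (flags : List (String × Bool)) (out : Bool) : Prop := out = break_the_rules_fetch_alt flags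
instance (flags : List (String × Bool)) (out : Bool) : Decidable (Spec_break_the_rules_fetch flags out) := by unfold Spec_break_the_rules_fetch; infer_instance

-- ===== CLAIM (what is proved, stated in full; the proofs are below) =====
def Claim_equal_break_the_rules_fetch : Prop := ∀ (flags : List (String × Bool)), Dom_break_the_rules_fetch flags → Spec_break_the_rules_fetch flags (break_the_rules_fetch flags)

-- ===== LEMMAS AND PROOFS =====

-- A's early-break scan is just: some rule is "id" and the list is long enough
theorem pvLoopA_eq (l : List String) (n : Int) :
    pvLoopA l n = (decide (1 < n) && l.contains "id") := by
  induction l with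
  | nil => simp [pvLoopA]
  | cons f rest ih =>
      simp only [pvLoopA, ih]
      by_cases hf : f = "id" <;> by_cases hn : (1:Int) < n <;>
        simp [hf, hn, Ne.symm]

-- B's fused pass computes: final count exceeds 1 AND a significant truthy item was seen
theorem pvGoB_eq (items : List (String × Bool)) (count : Int) (sig : Bool) :
    pvGoB items count sig =
      (decide (1 < count + (items.countP (fun p => p.2) : Int)) &&
        (sig || items.any (fun p => p.2 && p.1 == "id"))) := by
  induction items generalizing count sig with
  | nil => simp [pvGoB, Bool.and_comm]
  | cons p rest ih =>
      obtain ⟨k, v⟩ := p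
      rw [pvGoB]
      by_cases hs : sig = true ∧ (1:Int) < count
      · have hle : (0:Int) ≤ (((k, v) :: rest).countP (fun p => p.2) : Int) := by positivity
        simp only [hs.1, hs.2, decide_true, Bool.and_self, Bool.true_or, Bool.and_true]
        have : (1:Int) < count + (((k, v) :: rest).countP (fun p => p.2) : Int) := by omega
        simp [this]
      · have hguard : (sig && decide (1 < count)) = false := by
          cases sig with
          | false => simp
          | true =>
              simp only [Bool.true_and, decide_eq_false_iff_not]
              intro hc; exact hs ⟨rfl, hc⟩
        simp only [hguard, Bool.false_eq_true, if_false]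
        cases v with
        | true =>
            simp only [if_true, ih]
            have hcnt : count + 1 + (rest.countP (fun p => p.2) : Int)
                = count + (((k, true) :: rest).countP (fun p => p.2) : Int) := by
              simp; ring
            rw [hcnt]
            by_cases hk : k = "id"
            · simp [hk]
            · have hkf : (k == "id") = false := by simp [hk]
              simp [hkf, hk]
        | false =>
            simp only [ih, List.countP_cons]
            simp

theorem break_the_rules_fetch_spec : Claim_equal_break_the_rules_fetch := by
  unfold Claim_equal_break_the_rules_fetch
  intro flags _
  unfold Spec_break_the_rules_fetch break_the_rules_fetch break_the_rules_fetch_alt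
  set d := PySem.Dict.ofList flags with hd
  have hnd : d.keys.Nodup := PySem.Dict.nodup_keys_ofList flags
  have hitems : d.items = d.keys.map (fun k => (k, d.getD k false)) :=
    PySem.Dict.items_eq_map_keys d hnd false
  rw [pvLoopA_eq, pvGoB_eq, hitems]
  simp only [List.countP_map, List.any_map, Function.comp_def]
  rw [← List.countP_eq_length_filter]
  have hany : ∀ (l : List String),
      (l.any fun k => d.getD k false && k == "id")
        = (decide ("id" ∈ l) && d.getD "id" false) := by
    intro l
    induction l with
    | nil => simp
    | cons x xs ih =>
        by_cases hx : x = "id"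
        · cases hgd : d.getD "id" false <;> simp [hx, ih, hgd]
        · cases hgd : d.getD "id" false <;>
            simp [hx, Ne.symm hx, ih, hgd]
  simp [hany]
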